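-- pv_equiv track=rewrite | github.com/ED4UCP-ICLR2024/ED4UCP | avg_tree.py | DP
-- ===== SOURCE A (Python) =====
-- def DP(span_scores, length):
--     scores = [[0]*length]
--     spans = [[[]]*length]
--     for level in range(1, length):
--         scores.append([])
--         spans.append([])
--         for begin in range(length-level):
--             end = begin+level
--             this_span = str((begin, end))
--             span_score = span_scores.get(this_span, 0)
--             left, best_sub_score = max(([(left, scores[left][begin]+scores[level-left-1][begin+left+1]) for left in range(level)]), key=lambda x: x[1])
--             score = span_score + best_sub_score
--             new_spans = spans[left][begin] + spans[level-left-1][begin+left+1] + [this_span]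
--             scores[level].append(score)
--             spans[level].append(new_spans)
--     return spans[-1][0]
-- ===== SOURCE B (Python) =====
-- def DP(span_scores, length):
--     # Same CKY DP, but each cell stores only (best score, backpointer); the
--     # span list is reconstructed once at the end from the backpointers by an
--     # explicit-stack post-order traversal.
--     scores = [[0]*length]
--     bp = [[0]*length]
--     for level in range(1, length):
--         srow = []
--         brow = []
--         for begin in range(length - level):
--             best_left = 0
--             best_sub = scores[0][begin] + scores[level-1][begin+1]
--             for left in range(1, level):
--                 s = scores[left][begin] + scores[level-left-1][begin+left+1]
--                 if s > best_sub:
--                     best_left = left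
--                     best_sub = s
--             srow.append(span_scores.get(str((begin, begin+level)), 0) + best_sub)
--             brow.append(best_left)
--         scores.append(srow)
--         bp.append(brow)
--
--     out = []
--     stack = [(length - 1, 0, False)]
--     while stack:
--         level, begin, emit = stack.pop()
--         if emit:
--             out.append(str((begin, begin + level)))
--         elif level != 0:
--             left = bp[level][begin]
--             stack.append((level, begin, True))
--             stack.append((level - left - 1, begin + left + 1, False))
--             stack.append((left, begin, False))
--     return out
-- ===== Notes on version B (the rewrite author's own statement) =====
-- stated objective: alternative
-- what changed: Each DP cell stores only the best score and a backpointer (first argmax split, via an explicit running-max loop) instead of the fully concatenated span list; the result list is reconstructed once at the end by an explicit-stack post-order traversal of the backpointers, so no span lists are built or concatenated inside the DP.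
import Mathlib
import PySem

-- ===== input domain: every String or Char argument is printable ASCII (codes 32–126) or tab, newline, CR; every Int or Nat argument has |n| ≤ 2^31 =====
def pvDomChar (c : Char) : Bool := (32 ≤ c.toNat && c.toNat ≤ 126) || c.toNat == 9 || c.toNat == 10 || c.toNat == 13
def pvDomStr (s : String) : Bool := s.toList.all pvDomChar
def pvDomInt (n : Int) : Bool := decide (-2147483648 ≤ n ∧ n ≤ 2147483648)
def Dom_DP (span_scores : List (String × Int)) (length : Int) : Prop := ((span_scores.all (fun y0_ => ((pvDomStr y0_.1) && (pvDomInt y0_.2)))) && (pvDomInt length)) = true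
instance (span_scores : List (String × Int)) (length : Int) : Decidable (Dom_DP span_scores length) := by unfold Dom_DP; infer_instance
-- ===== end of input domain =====

-- B stores per CKY cell only the best score and a backpointer (first argmax split) and
-- rebuilds the span list once at the end, instead of concatenating span lists in every cell.

-- ===== PORT A =====
-- str((begin, end)) for two ints
def pvSpanStr (b e : Int) : String :=
  "(" ++ PySem.Int.toStr b ++ ", " ++ PySem.Int.toStr e ++ ")"

-- table[i][j]; in both loops below every access is in range, so the defaults are never observed
def pvCellI (t : List (List Int)) (i j : Int) : Int :=
  PySem.List.pyGetD (PySem.List.pyGetD t i []) j 0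
def pvCellS (t : List (List (List String))) (i j : Int) : List String :=
  PySem.List.pyGetD (PySem.List.pyGetD t i []) j []

-- body of A's inner 'for begin in range(length-level)' loop (appends to the level's rows)
def pvRowA (d : PySem.Dict String Int) (n : Int) (scores : List (List Int))
    (spans : List (List (List String))) (level : Int) : List Int × List (List String) :=
  (PySem.List.pyRange 0 (n - level) 1).foldl (fun r b =>
    let this_span := pvSpanStr b (b + level)
    let cands := (PySem.List.pyRange 0 level 1).map (fun left =>
      (left, pvCellI scores left b + pvCellI scores (level - left - 1) (b + left + 1)))
    -- Python's max(..., key=lambda x: x[1]); cands is nonempty since level ≥ 1, so the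
    -- .getD default is never observed
    let best := (PySem.List.max? cands (fun x => x.2)).getD (0, 0)
    (r.1 ++ [PySem.Dict.getD d this_span 0 + best.2],
     r.2 ++ [pvCellS spans best.1 b ++ pvCellS spans (level - best.1 - 1) (b + best.1 + 1) ++ [this_span]]))
    ([], [])

def DP (span_scores : List (String × Int)) (length : Int) : List String :=
  let d := PySem.Dict.ofList span_scores
  let st := (PySem.List.pyRange 1 length 1).foldl
    (fun st level =>
      let row := pvRowA d length st.1 st.2 level
      (st.1 ++ [row.1], st.2 ++ [row.2]))
    ([List.replicate length.toNat 0], [List.replicate length.toNat []])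
  -- spans[-1][0]; raises IndexError for length ≤ 0 (excluded by Pre_), defaults never observed inside Pre_
  PySem.List.pyGetD (PySem.List.pyGetD st.2 (-1) []) 0 []

-- ===== PORT B =====
-- B's explicit first-argmax loop 'for left in range(1, level)'
def pvBestB (scores : List (List Int)) (level b : Int) : Int × Int :=
  (PySem.List.pyRange 1 level 1).foldl (fun acc left =>
      let s := pvCellI scores left b + pvCellI scores (level - left - 1) (b + left + 1)
      if s > acc.2 then (left, s) else acc)
    (0, pvCellI scores 0 b + pvCellI scores (level - 1) (b + 1))

-- body of B's inner loop: appends the score and the backpointer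
def pvRowB (d : PySem.Dict String Int) (n : Int) (scores : List (List Int))
    (level : Int) : List Int × List Int :=
  (PySem.List.pyRange 0 (n - level) 1).foldl (fun r b =>
    let best := pvBestB scores level b
    (r.1 ++ [PySem.Dict.getD d (pvSpanStr b (b + level)) 0 + best.2],
     r.2 ++ [best.1]))
    ([], [])

-- B's explicit-stack post-order reconstruction (the while loop); the fuel argument only
-- makes the loop structural (it is chosen large enough to never be exhausted)
def pvBuildLoop (bp : List (List Int)) : Nat → List (Int × Int × Bool) → List String → List String
  | 0, _, out => out
  | _ + 1, [], out => out
  | fuel + 1, (level, b, emit) :: st, out =>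
    if emit then pvBuildLoop bp fuel st (out ++ [pvSpanStr b (b + level)])
    else if level == 0 then pvBuildLoop bp fuel st out
    else
      let left := pvCellI bp level b
      pvBuildLoop bp fuel
        ((left, b, false) :: (level - left - 1, b + left + 1, false) :: (level, b, true) :: st) out

def DP_alt (span_scores : List (String × Int)) (length : Int) : List String :=
  let d := PySem.Dict.ofList span_scores
  let st := (PySem.List.pyRange 1 length 1).foldl
    (fun st level =>
      let row := pvRowB d length st.1 level
      (st.1 ++ [row.1], st.2 ++ [row.2]))
    ([List.replicate length.toNat 0], [List.replicate length.toNat 0])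
  pvBuildLoop st.2 (4 * length.toNat + 2) [(length - 1, 0, false)] []

-- ===== PRECONDITION & SPEC =====
-- Python A raises IndexError on spans[-1][0] when length ≤ 0 (B raises there too)
def Pre_DP (span_scores : List (String × Int)) (length : Int) : Prop := 1 ≤ length
instance (span_scores : List (String × Int)) (length : Int) : Decidable (Pre_DP span_scores length) := by unfold Pre_DP; infer_instance

def pvWitness_DP : (List (String × Int)) × Int := ([("(0, 1)", 3), ("(0, 2)", -1)], 3)

def Spec_DP (span_scores : List (String × Int)) (length : Int) (out : List String) : Prop := out = DP_alt span_scores length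
instance (span_scores : List (String × Int)) (length : Int) (out : List String) : Decidable (Spec_DP span_scores length out) := by unfold Spec_DP; infer_instance

-- ===== CLAIM (what is proved, stated in full; the proofs are below) =====
def Claim_equal_DP : Prop := ∀ (span_scores : List (String × Int)) (length : Int), Dom_DP span_scores length → Pre_DP span_scores length → Spec_DP span_scores length (DP span_scores length)

-- ===== LEMMAS AND PROOFS =====


theorem pvGetDAppLt {α : Type} (t : List α) (x d : α) (i : Int) (h0 : 0 ≤ i) (h : i < t.length) :
    PySem.List.pyGetD (t ++ [x]) i d = PySem.List.pyGetD t i d := by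
  rw [PySem.List.pyGetD_eq_getElem (t ++ [x]) d h0 (by simp; omega),
      PySem.List.pyGetD_eq_getElem t d h0 h]
  exact List.getElem_append_left (by omega)

theorem pvGetDAppSelf {α : Type} (t : List α) (x d : α) :
    PySem.List.pyGetD (t ++ [x]) (t.length : Int) d = x := by
  rw [PySem.List.pyGetD_eq_getElem (t ++ [x]) d (by positivity) (by simp)]
  simp

theorem pvCellI_app (t : List (List Int)) (x : List Int) (i j : Int)
    (h0 : 0 ≤ i) (h : i < t.length) : pvCellI (t ++ [x]) i j = pvCellI t i j := by
  unfold pvCellI; rw [pvGetDAppLt _ _ _ _ h0 h]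

theorem pvCellS_app (t : List (List (List String))) (x : List (List String)) (i j : Int)
    (h0 : 0 ≤ i) (h : i < t.length) : pvCellS (t ++ [x]) i j = pvCellS t i j := by
  unfold pvCellS; rw [pvGetDAppLt _ _ _ _ h0 h]

theorem pvCellI_app_self (t : List (List Int)) (x : List Int) (j : Int) :
    pvCellI (t ++ [x]) (t.length : Int) j = PySem.List.pyGetD x j 0 := by
  unfold pvCellI; rw [pvGetDAppSelf]

theorem pvCellS_app_self (t : List (List (List String))) (x : List (List String)) (j : Int) :
    pvCellS (t ++ [x]) (t.length : Int) j = PySem.List.pyGetD x j [] := by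
  unfold pvCellS; rw [pvGetDAppSelf]

theorem pvMaxCons (x : Int × Int) (xs : List (Int × Int)) :
    PySem.List.max? (x :: xs) (fun p => p.2) = some (xs.foldl (fun b y => if b.2 < y.2 then y else b) x) := by
  simp only [PySem.List.max?, List.foldl_cons]
  induction xs generalizing x with
  | nil => rfl
  | cons y ys ih => simp only [List.foldl_cons]; rw [← ih]; split_ifs <;> rfl

theorem pvFoldPair {β γ : Type} (lst : List Int) (f1 : Int → β) (f2 : Int → γ) :
    lst.foldl (fun r b => (r.1 ++ [f1 b], r.2 ++ [f2 b])) ([], []) = (lst.map f1, lst.map f2) := by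
  rw [PySem.List.foldl_prod_mk (f := fun a b => a ++ [f1 b]) (g := fun a b => a ++ [f2 b])]
  simp only [PySem.List.foldl_append_singleton_eq_map, List.nil_append]

theorem pvRowA_eq (d : PySem.Dict String Int) (n : Int) (scores : List (List Int))
    (spans : List (List (List String))) (L : Int) :
    pvRowA d n scores spans L =
      ((PySem.List.pyRange 0 (n - L) 1).map (fun b =>
        PySem.Dict.getD d (pvSpanStr b (b + L)) 0 +
          ((PySem.List.max? ((PySem.List.pyRange 0 L 1).map (fun left =>
            (left, pvCellI scores left b + pvCellI scores (L - left - 1) (b + left + 1))))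
            (fun x => x.2)).getD (0, 0)).2),
       (PySem.List.pyRange 0 (n - L) 1).map (fun b =>
        let best := (PySem.List.max? ((PySem.List.pyRange 0 L 1).map (fun left =>
            (left, pvCellI scores left b + pvCellI scores (L - left - 1) (b + left + 1))))
            (fun x => x.2)).getD (0, 0)
        pvCellS spans best.1 b ++ pvCellS spans (L - best.1 - 1) (b + best.1 + 1)
          ++ [pvSpanStr b (b + L)])) := by
  unfold pvRowA
  exact pvFoldPair _ _ _

theorem pvRowB_eq (d : PySem.Dict String Int) (n : Int) (scores : List (List Int)) (L : Int) :
    pvRowB d n scores L =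
      ((PySem.List.pyRange 0 (n - L) 1).map (fun b =>
        PySem.Dict.getD d (pvSpanStr b (b + L)) 0 + (pvBestB scores L b).2),
       (PySem.List.pyRange 0 (n - L) 1).map (fun b => (pvBestB scores L b).1)) := by
  unfold pvRowB
  exact pvFoldPair _ _ _

theorem pvBestB_eq (L : Int) (hL : 1 ≤ L) (scores : List (List Int)) (b : Int) :
    ((PySem.List.max? ((PySem.List.pyRange 0 L 1).map (fun left =>
        (left, pvCellI scores left b + pvCellI scores (L - left - 1) (b + left + 1))))
        (fun x => x.2)).getD (0, 0)) = pvBestB scores L b := by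
  rw [PySem.List.pyRange_one_cons (by omega : (0:Int) < L), List.map_cons, pvMaxCons,
      Option.getD_some, pvBestB, List.foldl_map]
  norm_num

theorem pvBestB_fst_range (scores : List (List Int)) (L b : Int) (hL : 1 ≤ L) :
    0 ≤ (pvBestB scores L b).1 ∧ (pvBestB scores L b).1 < L := by
  unfold pvBestB
  have main : ∀ (xs : List Int), (∀ x ∈ xs, 0 ≤ x ∧ x < L) →
      ∀ acc : Int × Int, 0 ≤ acc.1 → acc.1 < L →
      0 ≤ (xs.foldl (fun acc left =>
        let s := pvCellI scores left b + pvCellI scores (L - left - 1) (b + left + 1)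
        if s > acc.2 then (left, s) else acc) acc).1 ∧
      (xs.foldl (fun acc left =>
        let s := pvCellI scores left b + pvCellI scores (L - left - 1) (b + left + 1)
        if s > acc.2 then (left, s) else acc) acc).1 < L := by
    intro xs
    induction xs with
    | nil => intro _ acc h1 h2; exact ⟨h1, h2⟩
    | cons y ys ih =>
      intro hmem acc h1 h2
      simp only [List.foldl_cons]
      apply ih (fun x hx => hmem x (List.mem_cons_of_mem _ hx))
      · dsimp only; split_ifs with h
        · exact (hmem y (List.mem_cons_self)).1
        · exact h1
      · dsimp only; split_ifs with h
        · exact (hmem y (List.mem_cons_self)).2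
        · exact h2
  apply main
  · intro x hx
    have := PySem.List.mem_pyRange_one.mp hx
    omega
  · norm_num
  · omega

-- the two tables after k outer iterations (levels 1..k)
def pvStA (d : PySem.Dict String Int) (n : Int) : Nat → List (List Int) × List (List (List String))
  | 0 => ([List.replicate n.toNat 0], [List.replicate n.toNat []])
  | k + 1 =>
    let st := pvStA d n k
    let row := pvRowA d n st.1 st.2 (1 + (k : Int))
    (st.1 ++ [row.1], st.2 ++ [row.2])

def pvStB (d : PySem.Dict String Int) (n : Int) : Nat → List (List Int) × List (List Int)
  | 0 => ([List.replicate n.toNat 0], [List.replicate n.toNat 0])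
  | k + 1 =>
    let st := pvStB d n k
    let row := pvRowB d n st.1 (1 + (k : Int))
    (st.1 ++ [row.1], st.2 ++ [row.2])

lemma pvFoldA_eq (d : PySem.Dict String Int) (n : Int) (k : Nat) :
    (PySem.List.pyRange 1 (1 + (k : Int)) 1).foldl
      (fun st level =>
        let row := pvRowA d n st.1 st.2 level
        (st.1 ++ [row.1], st.2 ++ [row.2]))
      ([List.replicate n.toNat 0], [List.replicate n.toNat []]) = pvStA d n k := by
  induction k with
  | zero => rw [PySem.List.pyRange_one_eq_nil (by norm_num)]; rfl
  | succ k ih =>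
    have hc : (1 + ((k + 1 : Nat) : Int)) = (1 + (k : Int)) + 1 := by push_cast; ring
    rw [hc, PySem.List.pyRange_one_succ_right (by omega), List.foldl_append, ih]
    rfl

lemma pvFoldB_eq (d : PySem.Dict String Int) (n : Int) (k : Nat) :
    (PySem.List.pyRange 1 (1 + (k : Int)) 1).foldl
      (fun st level =>
        let row := pvRowB d n st.1 level
        (st.1 ++ [row.1], st.2 ++ [row.2]))
      ([List.replicate n.toNat 0], [List.replicate n.toNat 0]) = pvStB d n k := by
  induction k with
  | zero => rw [PySem.List.pyRange_one_eq_nil (by norm_num)]; rfl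
  | succ k ih =>
    have hc : (1 + ((k + 1 : Nat) : Int)) = (1 + (k : Int)) + 1 := by push_cast; ring
    rw [hc, PySem.List.pyRange_one_succ_right (by omega), List.foldl_append, ih]
    rfl

-- the invariant linking A's and B's tables after k iterations
def pvInv (d : PySem.Dict String Int) (n : Int) (k : Nat) : Prop :=
  (pvStA d n k).1 = (pvStB d n k).1 ∧
  (pvStA d n k).1.length = k + 1 ∧ (pvStA d n k).2.length = k + 1 ∧
  (pvStB d n k).2.length = k + 1 ∧
  (∀ b : Int, 0 ≤ b → b < n → pvCellS (pvStA d n k).2 0 b = []) ∧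
  (∀ l : Nat, 1 ≤ l → l ≤ k → ∀ b : Int, 0 ≤ b → b + l < n →
    0 ≤ pvCellI (pvStB d n k).2 l b ∧ pvCellI (pvStB d n k).2 l b < l ∧
    pvCellS (pvStA d n k).2 l b =
      pvCellS (pvStA d n k).2 (pvCellI (pvStB d n k).2 l b) b ++
        pvCellS (pvStA d n k).2 (l - pvCellI (pvStB d n k).2 l b - 1)
          (b + pvCellI (pvStB d n k).2 l b + 1)
        ++ [pvSpanStr b (b + l)])

lemma pvInv_holds (d : PySem.Dict String Int) (n : Int) (k : Nat)
    (hk : (k : Int) ≤ n - 1) : pvInv d n k := by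
  induction k with
  | zero =>
    refine ⟨rfl, rfl, rfl, rfl, ?_, ?_⟩
    · intro b hb hbn
      show pvCellS [List.replicate n.toNat []] 0 b = []
      unfold pvCellS
      rw [PySem.List.pyGetD_zero_cons]
      rw [PySem.List.pyGetD_eq_getElem _ _ hb (by simp; omega)]
      simp
    · intro l hl1 hl0; omega
  | succ k ih =>
    have hk' : (k : Int) ≤ n - 1 := by push_cast at hk; omega
    obtain ⟨hEq, hlenS, hlenP, hlenB, hRow0, hRec⟩ := ih hk'
    set sA := (pvStA d n k).1 with hsA
    set pA := (pvStA d n k).2 with hpA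
    set sB := (pvStB d n k).1 with hsB
    set bB := (pvStB d n k).2 with hbB
    set L : Int := 1 + (k : Int) with hLdef
    have hL1 : (1 : Int) ≤ L := by omega
    have hstA : pvStA d n (k + 1) =
        (sA ++ [(pvRowA d n sA pA L).1], pA ++ [(pvRowA d n sA pA L).2]) := rfl
    have hstB : pvStB d n (k + 1) =
        (sB ++ [(pvRowB d n sB L).1], bB ++ [(pvRowB d n sB L).2]) := rfl
    have hrA := pvRowA_eq d n sA pA L
    have hrB := pvRowB_eq d n sB L
    simp only [pvBestB_eq L hL1] at hrA
    rw [← hEq] at hrB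
    refine ⟨?_, ?_, ?_, ?_, ?_, ?_⟩
    · rw [hstA, hstB]; dsimp only; rw [← hEq, hrA, hrB]
    · rw [hstA]; simp [hlenS]
    · rw [hstA]; simp [hlenP]
    · rw [hstB]; simp [hlenB]
    · intro b hb hbn
      rw [hstA]
      have h0 : (0 : Int) < pA.length := by rw [hlenP]; positivity
      rw [pvCellS_app _ _ _ _ le_rfl h0]
      exact hRow0 b hb hbn
    · intro l hl1 hlk b hb hbn
      rw [hstA, hstB]
      by_cases hcase : l ≤ k
      · have hlc : (l : Int) < bB.length := by rw [hlenB]; push_cast; omega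
        have hlp : (l : Int) < pA.length := by rw [hlenP]; push_cast; omega
        have hl0 : (0 : Int) ≤ (l : Int) := by positivity
        rw [pvCellI_app _ _ _ _ hl0 hlc, pvCellS_app _ _ _ _ hl0 hlp]
        obtain ⟨r1, r2, r3⟩ := hRec l hl1 hcase b hb hbn
        refine ⟨r1, r2, ?_⟩
        have hx1 : pvCellI bB (l : Int) b < (pA.length : Int) := by
          rw [hlenP]; push_cast; omega
        have hy0 : (0 : Int) ≤ (l : Int) - pvCellI bB (l : Int) b - 1 := by omega
        have hy1 : (l : Int) - pvCellI bB (l : Int) b - 1 < (pA.length : Int) := by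
          rw [hlenP]; push_cast; omega
        rw [pvCellS_app _ _ _ _ r1 hx1, pvCellS_app _ _ _ _ hy0 hy1]
        exact r3
      · have hlek : l = k + 1 := by omega
        subst hlek
        have hbrange : b < n - L := by push_cast at hbn; omega
        have hLc : ((k + 1 : Nat) : Int) = (bB.length : Int) := by rw [hlenB]
        have hLp : ((k + 1 : Nat) : Int) = (pA.length : Int) := by rw [hlenP]
        have hLL : ((k + 1 : Nat) : Int) = L := by push_cast; ring
        have hcellI : pvCellI (bB ++ [(pvRowB d n sB L).2]) ((k + 1 : Nat) : Int) b =
            (pvBestB sA L b).1 := by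
          rw [hLc, pvCellI_app_self, ← hEq, hrB]
          exact PySem.List.pyGetD_map_pyRange_of_nonneg _ (n - L) b 0 hb hbrange
        have hrange := pvBestB_fst_range sA L b hL1
        have hcellS : pvCellS (pA ++ [(pvRowA d n sA pA L).2]) ((k + 1 : Nat) : Int) b =
            pvCellS pA (pvBestB sA L b).1 b ++
              pvCellS pA (L - (pvBestB sA L b).1 - 1) (b + (pvBestB sA L b).1 + 1) ++
              [pvSpanStr b (b + L)] := by
          rw [hLp, pvCellS_app_self, hrA]
          exact PySem.List.pyGetD_map_pyRange_of_nonneg _ (n - L) b [] hb hbrange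
        rw [hcellI, hcellS]
        refine ⟨hrange.1, by rw [hLL]; exact hrange.2, ?_⟩
        have hr1 := hrange.1
        have hr2 := hrange.2
        have hz1 : (pvBestB sA L b).1 < (pA.length : Int) := by
          rw [hlenP]; push_cast; omega
        have hw0 : (0 : Int) ≤ L - (pvBestB sA L b).1 - 1 := by omega
        have hw1 : L - (pvBestB sA L b).1 - 1 < (pA.length : Int) := by
          rw [hlenP]; push_cast; omega
        rw [hLL, pvCellS_app _ _ _ _ hr1 hz1, pvCellS_app _ _ _ _ hw0 hw1]

-- meaning of one stack entry: an emit-entry contributes its span string, a work-entry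
-- the whole span list of its cell in A's table
def pvEmit (pA : List (List (List String))) (e : Int × Int × Bool) : List String :=
  if e.2.2 then [pvSpanStr e.2.1 (e.2.1 + e.1)] else pvCellS pA e.1 e.2.1

-- fuel weight of one stack entry (an upper bound on the pops it generates)
def pvW (e : Int × Int × Bool) : Nat := if e.2.2 then 1 else 4 * e.1.toNat + 2

def pvValidE (n : Int) (k : Nat) (e : Int × Int × Bool) : Prop :=
  e.2.2 = true ∨ (0 ≤ e.1 ∧ e.1 ≤ (k : Int) ∧ 0 ≤ e.2.1 ∧ e.2.1 + e.1 < n)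

lemma pvLoop_eq (d : PySem.Dict String Int) (n : Int) (k : Nat) (hInv : pvInv d n k) :
    ∀ (fuel : Nat) (st : List (Int × Int × Bool)) (out : List String),
      (∀ e ∈ st, pvValidE n k e) → (st.map pvW).sum ≤ fuel →
      pvBuildLoop (pvStB d n k).2 fuel st out =
        out ++ st.flatMap (pvEmit (pvStA d n k).2) := by
  obtain ⟨hEq, hlenS, hlenP, hlenB, hRow0, hRec⟩ := hInv
  intro fuel
  induction fuel with
  | zero =>
    intro st out hval hsum
    cases st with
    | nil => simp [pvBuildLoop]
    | cons e st =>
      exfalso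
      have h1 : 1 ≤ pvW e := by unfold pvW; split_ifs <;> omega
      simp only [List.map_cons, List.sum_cons] at hsum
      omega
  | succ fuel ih =>
    intro st out hval hsum
    cases st with
    | nil => simp [pvBuildLoop]
    | cons e st =>
      obtain ⟨level, b, emit⟩ := e
      simp only [List.map_cons, List.sum_cons] at hsum
      cases emit with
      | true =>
        simp only [pvBuildLoop, if_true]
        rw [ih st (out ++ [pvSpanStr b (b + level)])
          (fun e he => hval e (List.mem_cons_of_mem _ he)) (by simp [pvW] at hsum ⊢; omega)]
        simp [pvEmit]
      | false =>
        have hv := hval (level, b, false) List.mem_cons_self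
        have hrng : 0 ≤ level ∧ level ≤ (k : Int) ∧ 0 ≤ b ∧ b + level < n := by
          rcases hv with h | h
          · simp at h
          · exact h
        obtain ⟨hl0, hlk, hb0, hbn⟩ := hrng
        have hwf : pvW (level, b, false) = 4 * level.toNat + 2 := rfl
        by_cases hz : level = 0
        · subst hz
          simp only [pvBuildLoop, Bool.false_eq_true, if_false, beq_self_eq_true, if_true]
          rw [ih st out (fun e he => hval e (List.mem_cons_of_mem _ he))
            (by rw [hwf] at hsum; omega)]
          have : pvEmit (pvStA d n k).2 (0, b, false) = [] := by
            unfold pvEmit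
            simpa using hRow0 b hb0 (by omega)
          simp [this]
        · -- level ≥ 1: expand via the backpointer
          obtain ⟨l, rfl⟩ : ∃ l : Nat, level = (l : Int) := ⟨level.toNat, by omega⟩
          have hl1 : 1 ≤ l := by omega
          obtain ⟨r1, r2, r3⟩ := hRec l hl1 (by exact_mod_cast hlk) b hb0 hbn
          simp only [pvBuildLoop, Bool.false_eq_true, if_false,
            show (((l : Nat) : Int) == 0) = false by simp; omega]
          set left := pvCellI (pvStB d n k).2 ((l : Nat) : Int) b with hLdef
          have hstep : ∀ e ∈ (left, b, false) :: ((l : Int) - left - 1, b + left + 1, false) ::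
              ((l : Int), b, true) :: st, pvValidE n k e := by
            intro e he
            simp only [List.mem_cons] at he
            rcases he with rfl | rfl | rfl | he
            · refine Or.inr ⟨?_, ?_, ?_, ?_⟩ <;> dsimp only <;> omega
            · refine Or.inr ⟨?_, ?_, ?_, ?_⟩ <;> dsimp only <;> omega
            · exact Or.inl rfl
            · exact hval e (List.mem_cons_of_mem _ he)
          have hsum' : (((left, b, false) :: ((l : Int) - left - 1, b + left + 1, false) ::
              ((l : Int), b, true) :: st).map pvW).sum ≤ fuel := by
            have hsum2 : 4 * (l : Int).toNat + 2 + (st.map pvW).sum ≤ fuel + 1 := by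
              simpa [pvW] using hsum
            simp only [List.map_cons, List.sum_cons]
            simp [pvW]
            have h1 : left.toNat + ((l : Int) - left - 1).toNat = l - 1 := by omega
            omega
          rw [ih _ out hstep hsum']
          simp [pvEmit, List.append_assoc, r3]

lemma pvDP_eq (ss : List (String × Int)) (n : Int) (h1 : 1 ≤ n) :
    DP ss n = pvCellS (pvStA (PySem.Dict.ofList ss) n (n - 1).toNat).2 (((n - 1).toNat : Nat) : Int) 0 := by
  have hmn : (1 + (((n - 1).toNat : Nat) : Int)) = n := by omega
  simp only [DP]
  rw [← hmn, pvFoldA_eq]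
  set m : Nat := (n - 1).toNat
  have hms : ((1 : Int) + (m : Int) - 1).toNat = m := by omega
  rw [hms]
  set pA := (pvStA (PySem.Dict.ofList ss) (1 + (m : Int)) m).2 with hpA
  obtain ⟨_, _, hlenP, _, _, _⟩ := pvInv_holds (PySem.Dict.ofList ss) (1 + (m : Int)) m (by omega)
  rw [← hpA] at hlenP
  unfold pvCellS
  rw [PySem.List.pyGetD_neg_one pA [] (by intro hnil; rw [hnil] at hlenP; simp at hlenP),
      PySem.List.pyGetD_natCast]
  congr 1
  rw [List.getLast_eq_getElem, List.getD_eq_getElem _ _ (by omega)]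
  simp only [hlenP, Nat.add_sub_cancel]

lemma pvDPalt_eq (ss : List (String × Int)) (n : Int) (h1 : 1 ≤ n) :
    DP_alt ss n = pvCellS (pvStA (PySem.Dict.ofList ss) n (n - 1).toNat).2 (((n - 1).toNat : Nat) : Int) 0 := by
  have hmn : (1 + (((n - 1).toNat : Nat) : Int)) = n := by omega
  simp only [DP_alt]
  rw [← hmn, pvFoldB_eq]
  set m : Nat := (n - 1).toNat
  have hms : ((1 : Int) + (m : Int) - 1).toNat = m := by omega
  have hms' : ((1 : Int) + (m : Int)) - 1 = (m : Int) := by omega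
  rw [hms, hms']
  have hInv := pvInv_holds (PySem.Dict.ofList ss) (1 + (m : Int)) m (by omega)
  rw [pvLoop_eq (PySem.Dict.ofList ss) (1 + (m : Int)) m hInv _ _ []
    (by intro e he
        simp only [List.mem_cons, List.not_mem_nil, or_false] at he
        subst he
        refine Or.inr ⟨?_, ?_, ?_, ?_⟩ <;> dsimp only <;> omega)
    (by simp [pvW]; omega)]
  simp [pvEmit]

theorem DP_spec : Claim_equal_DP := by
  intro ss n _ hpre
  have h1 : (1 : Int) ≤ n := hpre
  show DP ss n = DP_alt ss n
  rw [pvDP_eq ss n h1, pvDPalt_eq ss n h1]
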